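-- pv_equiv track=rewrite | github.com/AntonFedonin/Python_HomeWork | Seminar_3/Task_2.py | get_poduct
-- ===== SOURCE A (Python) =====
-- def get_poduct(list):
--     product = []
--     stop = int(len(list)/2)
--     j = len(list)-1
--     if len(list) % 2 > 0:
--         for i in range(0, stop):
--             product.append(list[i] * list[j])
--             j -= 1
--         product.append(list[j]**2)
--     else:
--         for i in range(0, stop):
--             product.append(list[i] * list[j])
--             j -= 1
--     return product
-- ===== SOURCE B (Python) =====
-- def get_poduct(list):
--     pairs = [x * y for x, y in zip(list, list[::-1])]
--     return pairs[:(len(list) + 1) // 2]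
-- ===== Notes on version B (the rewrite author's own statement) =====
-- stated objective: simpler
-- what changed: Replaces the parity branch, running back index j and explicit middle-square special case with one comprehension over zip(list, list[::-1]) truncated to the first (n+1)//2 mirrored products (the odd middle pair (mid,mid) yields mid*mid = mid**2 automatically).
import Mathlib
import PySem

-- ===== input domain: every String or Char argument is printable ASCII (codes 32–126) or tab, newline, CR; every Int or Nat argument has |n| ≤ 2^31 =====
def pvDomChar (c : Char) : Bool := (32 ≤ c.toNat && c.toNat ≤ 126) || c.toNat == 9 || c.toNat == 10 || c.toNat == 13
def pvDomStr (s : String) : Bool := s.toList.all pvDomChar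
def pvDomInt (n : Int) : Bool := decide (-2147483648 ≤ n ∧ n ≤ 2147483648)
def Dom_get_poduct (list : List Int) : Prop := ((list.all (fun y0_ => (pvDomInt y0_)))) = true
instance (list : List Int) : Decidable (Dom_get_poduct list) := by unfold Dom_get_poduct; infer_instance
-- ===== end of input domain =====

-- B replaces A's parity branch, running back index and middle-square special case by one
-- zip-with-reverse comprehension truncated to (n+1)/2 entries (objective: simpler).

-- ===== PORT A =====
-- literal port of A: fold over range(0, stop) carrying (product, j); indices are always
-- in range on every input, so pyGet? … .getD 0 is exact (the default is never used)
def get_poduct (list : List Int) : List Int :=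
  let stop : Nat := list.length / 2
  let st := (PySem.List.pyRange 0 stop 1).foldl
    (fun (st : List Int × Int) i =>
      (st.1 ++ [((PySem.List.pyGet? list i).getD 0) * ((PySem.List.pyGet? list st.2).getD 0)],
       st.2 - 1))
    ([], (list.length : Int) - 1)
  if (list.length : Int) % 2 > 0 then
    st.1 ++ [((PySem.List.pyGet? list st.2).getD 0) ^ 2]
  else
    st.1

-- ===== PORT B =====
def get_poduct_alt (list : List Int) : List Int :=
  ((list.zip list.reverse).map (fun p => p.1 * p.2)).take ((list.length + 1) / 2)

-- ===== PRECONDITION & SPEC =====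
def Spec_get_poduct (list : List Int) (out : List Int) : Prop := out = get_poduct_alt list
instance (list : List Int) (out : List Int) : Decidable (Spec_get_poduct list out) := by unfold Spec_get_poduct; infer_instance

-- ===== CLAIM (what is proved, stated in full; the proofs are below) =====
def Claim_equal_get_poduct : Prop := ∀ (list : List Int), Dom_get_poduct list → Spec_get_poduct list (get_poduct list)

-- ===== LEMMAS AND PROOFS =====

-- A's loop: appending fold over range(0,s) with back index j produces the mapped list
theorem pv_loopA (l : List Int) (s : Nat) (acc : List Int) (j : Int) :
    (PySem.List.pyRange 0 s 1).foldl
      (fun (st : List Int × Int) i =>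
        (st.1 ++ [((PySem.List.pyGet? l i).getD 0) * ((PySem.List.pyGet? l st.2).getD 0)],
         st.2 - 1))
      (acc, j)
    = (acc ++ (List.range s).map
        (fun (k : Nat) => ((PySem.List.pyGet? l (k : Int)).getD 0) *
                          ((PySem.List.pyGet? l (j - (k : Int))).getD 0)),
       j - s) := by
  induction s generalizing acc j with
  | zero => simp
  | succ n ih =>
    have hc : ((n + 1 : Nat) : Int) = (n : Int) + 1 := by push_cast; ring
    rw [hc, PySem.List.pyRange_one_succ_right (Int.natCast_nonneg n), List.foldl_append, ih]
    simp [List.range_succ]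
    ring_nf

-- A's result is the canonical mapped list of mirrored products
theorem pv_A_canon (l : List Int) :
    get_poduct l = (List.range ((l.length + 1) / 2)).map
      (fun (k : Nat) => ((PySem.List.pyGet? l (k : Int)).getD 0) *
                        ((PySem.List.pyGet? l ((l.length : Int) - 1 - (k : Int))).getD 0)) := by
  simp only [get_poduct]
  rw [pv_loopA]
  by_cases h : (l.length : Int) % 2 > 0
  · simp only [h, if_pos]
    have hodd : l.length % 2 = 1 := by omega
    have hm : (l.length + 1) / 2 = l.length / 2 + 1 := by omega
    rw [hm, List.range_succ, List.map_append]
    simp only [List.map_cons, List.map_nil, List.nil_append, List.append_cancel_left_eq]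
    have hij : (l.length : Int) - 1 - ((l.length / 2 : Nat) : Int)
        = ((l.length / 2 : Nat) : Int) := by push_cast; omega
    rw [hij, pow_two]
  · simp only [h, if_neg, not_false_iff]
    have heven : l.length % 2 = 0 := by omega
    have hm : (l.length + 1) / 2 = l.length / 2 := by omega
    rw [hm]
    simp

-- B's result is the same canonical mapped list
theorem pv_B_canon (l : List Int) :
    get_poduct_alt l = (List.range ((l.length + 1) / 2)).map
      (fun (k : Nat) => ((PySem.List.pyGet? l (k : Int)).getD 0) *
                        ((PySem.List.pyGet? l ((l.length : Int) - 1 - (k : Int))).getD 0)) := by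
  unfold get_poduct_alt
  apply List.ext_getElem
  · simp [List.length_zip]
    omega
  · intro k h1 h2
    have hk : k < (l.length + 1) / 2 := by
      simpa using h2
    have hkl : k < l.length := by omega
    have e1 : PySem.List.pyGet? l (k : Int) = some l[k] := by
      rw [PySem.List.pyGet?_natCast]
      exact List.getElem?_eq_getElem hkl
    have hij : (l.length : Int) - 1 - (k : Int) = ((l.length - 1 - k : Nat) : Int) := by
      omega
    have e2 : PySem.List.pyGet? l ((l.length : Int) - 1 - (k : Int))
        = some l[l.length - 1 - k] := by
      rw [hij, PySem.List.pyGet?_natCast]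
      exact List.getElem?_eq_getElem (by omega)
    simp [List.getElem_reverse, e2, List.getElem?_eq_getElem hkl]

-- ===== VERDICT (by name: the statement is the Claim_ definition above) =====
theorem get_poduct_spec : Claim_equal_get_poduct := by
  intro l _
  unfold Spec_get_poduct
  rw [pv_A_canon, pv_B_canon]
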